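-- pv_equiv track=rewrite | github.com/open-mmlab/mmrazor | mmrazor/models/algorithms/pruning/slimmable_network.py | merge_channel_cfgs
-- ===== SOURCE A (Python) =====
-- from typing import Dict, List, Optional, Union
--
-- def merge_channel_cfgs(channel_cfgs: List[Dict]) -> Dict:
--     """Merge several channel configs."""
--     merged_channel_cfg = dict()
--     num_subnet = len(channel_cfgs)
--
--     for module_name in channel_cfgs[0].keys():
--         channels_per_layer = [
--             channel_cfgs[idx][module_name] for idx in range(num_subnet)
--         ]
--         merged_channels_per_layer = dict()
--         for key in channels_per_layer[0].keys():
--             merged_channels = [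
--                 channels_per_layer[idx][key] for idx in range(num_subnet)
--             ]
--             merged_channels_per_layer[key] = merged_channels
--         merged_channel_cfg[module_name] = merged_channels_per_layer
--
--     return merged_channel_cfg
-- ===== SOURCE B (Python) =====
-- def merge_channel_cfgs(channel_cfgs):
--     """Merge several channel configs (skeleton-then-append decomposition)."""
--     first = channel_cfgs[0]
--     merged_channel_cfg = {
--         module_name: {key: [] for key in first[module_name].keys()}
--         for module_name in first.keys()
--     }
--     for channel_cfg in channel_cfgs:
--         for module_name, merged_channels_per_layer in merged_channel_cfg.items():
--             channels = channel_cfg[module_name]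
--             for key, merged_channels in merged_channels_per_layer.items():
--                 merged_channels.append(channels[key])
--     return merged_channel_cfg
-- ===== Notes on version B (the rewrite author's own statement) =====
-- stated objective: alternative
-- what changed: B reverses the loop nest: it first builds the empty nested skeleton from channel_cfgs[0]'s keys, then makes one pass over the configs appending each config's value into every cell, instead of A's gather-each-cell-across-all-subnets comprehensions; Pre_ excludes empty input and configs missing a key of channel_cfgs[0] (Python raises IndexError/KeyError there) and association lists with duplicate keys, which no Python dict can represent.
import Mathlib
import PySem

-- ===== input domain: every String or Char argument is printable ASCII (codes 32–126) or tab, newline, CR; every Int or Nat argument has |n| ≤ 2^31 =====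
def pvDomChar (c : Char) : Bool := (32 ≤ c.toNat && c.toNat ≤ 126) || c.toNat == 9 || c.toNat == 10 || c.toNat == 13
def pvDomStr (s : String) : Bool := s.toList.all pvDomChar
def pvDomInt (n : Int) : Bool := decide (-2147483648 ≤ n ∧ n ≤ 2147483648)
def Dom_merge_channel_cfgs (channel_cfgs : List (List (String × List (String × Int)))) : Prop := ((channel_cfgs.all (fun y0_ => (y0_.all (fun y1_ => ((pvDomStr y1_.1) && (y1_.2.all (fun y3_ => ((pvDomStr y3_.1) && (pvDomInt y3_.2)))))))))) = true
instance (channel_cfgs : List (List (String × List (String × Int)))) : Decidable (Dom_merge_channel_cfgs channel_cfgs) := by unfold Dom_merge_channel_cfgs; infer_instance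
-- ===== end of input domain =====

-- B rebuilds the merge as skeleton-then-append (one pass over configs, scatter into prebuilt empty cells)
-- instead of A's per-cell gather comprehensions; same asymptotic cost (objective: alternative).


-- dict lookup on an association list (Python d[k], first match), shared by both ports and Pre_
def pvDget {α : Type} (d : List (String × α)) (k : String) : Option α :=
  (PySem.Dict.mk d).get? k

-- ===== PORT A =====
def merge_channel_cfgs (channel_cfgs : List (List (String × List (String × Int)))) : List (String × List (String × List Int)) :=
  match channel_cfgs with
  | [] => []  -- unreachable under Pre_: Python raises IndexError on channel_cfgs[0]
  | c0 :: _ =>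
    ((PySem.Dict.mk c0).keys.foldl
      (fun (merged_channel_cfg : PySem.Dict String (List (String × List Int))) module_name =>
        let channels_per_layer : List (List (String × Int)) :=
          (PySem.List.pyRange 0 channel_cfgs.length 1).map
            (fun idx => (pvDget (PySem.List.pyGetD channel_cfgs idx []) module_name).getD [])
        let merged_channels_per_layer : List (String × List Int) :=
          match channels_per_layer with
          | [] => []  -- unreachable: channel_cfgs is nonempty here
          | l0 :: _ =>
            ((PySem.Dict.mk l0).keys.foldl
              (fun (m2 : PySem.Dict String (List Int)) key =>
                m2.insert key (channels_per_layer.map (fun l => (pvDget l key).getD 0)))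
              PySem.Dict.empty).items
        merged_channel_cfg.insert module_name merged_channels_per_layer)
      PySem.Dict.empty).items

-- ===== PORT B =====
def merge_channel_cfgs_alt (channel_cfgs : List (List (String × List (String × Int)))) : List (String × List (String × List Int)) :=
  match channel_cfgs with
  | [] => []  -- unreachable under Pre_: Python raises IndexError on channel_cfgs[0]
  | first :: _ =>
    -- phase 1: skeleton of empty lists, keyed by channel_cfgs[0]'s keys
    let skeleton : List (String × List (String × List Int)) :=
      ((PySem.Dict.mk first).keys.foldl
        (fun (acc : PySem.Dict String (List (String × List Int))) module_name =>
          acc.insert module_name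
            (((PySem.Dict.mk ((pvDget first module_name).getD [])).keys.foldl
                (fun (a2 : PySem.Dict String (List Int)) key => a2.insert key [])
                PySem.Dict.empty).items))
        PySem.Dict.empty).items
    -- phase 2: one pass over the configs, appending into every cell
    channel_cfgs.foldl
      (fun (merged : List (String × List (String × List Int))) channel_cfg =>
        merged.map (fun e =>
          (e.1, e.2.map (fun kv =>
            (kv.1, kv.2 ++ [(pvDget ((pvDget channel_cfg e.1).getD []) kv.1).getD 0])))))
      skeleton

-- ===== PRECONDITION & SPEC =====
-- Pre_ excludes: empty input (A raises IndexError on channel_cfgs[0]); configs missing a module key of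
-- channel_cfgs[0] or an inner key of channel_cfgs[0]'s corresponding inner dict (A raises KeyError);
-- and association lists with duplicate keys, which no Python dict can represent.
def Pre_merge_channel_cfgs (channel_cfgs : List (List (String × List (String × Int)))) : Prop :=
  channel_cfgs ≠ [] ∧
  (∀ c ∈ channel_cfgs, (c.map Prod.fst).Nodup ∧ ∀ p ∈ c, (p.2.map Prod.fst).Nodup) ∧
  (∀ c ∈ channel_cfgs, ∀ m ∈ (channel_cfgs.headD []).map Prod.fst,
    m ∈ c.map Prod.fst ∧
    ∀ k ∈ ((pvDget (channel_cfgs.headD []) m).getD []).map Prod.fst,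
      k ∈ ((pvDget c m).getD []).map Prod.fst)
instance (channel_cfgs : List (List (String × List (String × Int)))) : Decidable (Pre_merge_channel_cfgs channel_cfgs) := by unfold Pre_merge_channel_cfgs; infer_instance

def pvWitness_merge_channel_cfgs : (List (List (String × List (String × Int)))) :=
  [[("conv1", [("out", 8), ("in", 3)]), ("conv2", [("out", 16)])],
   [("conv1", [("out", 4), ("in", 3)]), ("conv2", [("out", 12)])]]

def Spec_merge_channel_cfgs (channel_cfgs : List (List (String × List (String × Int)))) (out : List (String × List (String × List Int))) : Prop := out = merge_channel_cfgs_alt channel_cfgs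
instance (channel_cfgs : List (List (String × List (String × Int)))) (out : List (String × List (String × List Int))) : Decidable (Spec_merge_channel_cfgs channel_cfgs out) := by unfold Spec_merge_channel_cfgs; infer_instance

-- ===== CLAIM (what is proved, stated in full; the proofs are below) =====
def Claim_equal_merge_channel_cfgs : Prop := ∀ (channel_cfgs : List (List (String × List (String × Int)))), Dom_merge_channel_cfgs channel_cfgs → Pre_merge_channel_cfgs channel_cfgs → Spec_merge_channel_cfgs channel_cfgs (merge_channel_cfgs channel_cfgs)

-- ===== LEMMAS AND PROOFS =====

-- the single cell value: channel_cfg[m][k] (with defaults never hit under Pre_)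
def pvCell (c : List (String × List (String × Int))) (m k : String) : Int :=
  (pvDget ((pvDget c m).getD []) k).getD 0

-- common closed form of both programs under Pre_
def pvForm (channel_cfgs : List (List (String × List (String × Int)))) (c0 : List (String × List (String × Int))) : List (String × List (String × List Int)) :=
  (c0.map Prod.fst).map (fun m =>
    (m, (((pvDget c0 m).getD []).map Prod.fst).map (fun k =>
      (k, channel_cfgs.map (fun c => pvCell c m k)))))

-- first-match lookup of a key that occurs in a duplicate-free association list hits its entry
theorem pvDget_mem (c0 : List (String × List (String × Int))) (hnd : (c0.map Prod.fst).Nodup)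
    {m : String} (hm : m ∈ c0.map Prod.fst) : ∃ inn, (m, inn) ∈ c0 ∧ pvDget c0 m = some inn := by
  rcases List.mem_map.mp hm with ⟨p, hp, hp1⟩
  exact ⟨p.2, by simpa [← hp1], by
    have : (PySem.Dict.mk c0).get? p.1 = some p.2 :=
      PySem.Dict.get?_of_mem_items _ hp (by simpa using hnd)
    simpa [pvDget, ← hp1] using this⟩

-- the list comprehension over range(num_subnet) gathers channel_cfgs[idx][module_name] in list order
theorem pvCpl_eq (cfgs : List (List (String × List (String × Int)))) (m : String) :
    (PySem.List.pyRange 0 cfgs.length 1).map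
        (fun idx => (pvDget (PySem.List.pyGetD cfgs idx []) m).getD [])
      = cfgs.map (fun c => (pvDget c m).getD []) := by
  have h := PySem.List.map_pyGetD_pyRange_zero' cfgs []
  calc (PySem.List.pyRange 0 cfgs.length 1).map
          (fun idx => (pvDget (PySem.List.pyGetD cfgs idx []) m).getD [])
      = ((PySem.List.pyRange 0 cfgs.length 1).map
          (fun idx => PySem.List.pyGetD cfgs idx [])).map (fun c => (pvDget c m).getD []) := by
        rw [List.map_map]; rfl
    _ = cfgs.map (fun c => (pvDget c m).getD []) := by rw [h]

-- phase 2 of B in closed form: folding the per-config append over cs accumulates each cell's gathered list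
theorem pvScatter (cs : List (List (String × List (String × Int)))) (acc : List (String × List (String × List Int))) :
    cs.foldl (fun (merged : List (String × List (String × List Int))) channel_cfg =>
        merged.map (fun e => (e.1, e.2.map (fun kv =>
          (kv.1, kv.2 ++ [(pvDget ((pvDget channel_cfg e.1).getD []) kv.1).getD 0]))))) acc
      = acc.map (fun e => (e.1, e.2.map (fun kv =>
          (kv.1, kv.2 ++ cs.map (fun c => pvCell c e.1 kv.1))))) := by
  induction cs generalizing acc with
  | nil => simp
  | cons c cs ih =>
    rw [List.foldl_cons, ih]
    rw [List.map_map]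
    apply List.map_congr_left
    intro e _
    simp [List.map_map, Function.comp_def, pvCell]

theorem pvA_eq_form (c0 : List (String × List (String × Int))) (rest : List (List (String × List (String × Int))))
    (hnd : (c0.map Prod.fst).Nodup) (hnd2 : ∀ p ∈ c0, (p.2.map Prod.fst).Nodup) :
    merge_channel_cfgs (c0 :: rest) = pvForm (c0 :: rest) c0 := by
  have houter := PySem.Dict.items_foldl_insert_fresh (c0.map Prod.fst) (fun m => m)
    (fun module_name =>
      let channels_per_layer : List (List (String × Int)) :=
        (PySem.List.pyRange 0 (c0 :: rest).length 1).map
          (fun idx => (pvDget (PySem.List.pyGetD (c0 :: rest) idx []) module_name).getD [])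
      match channels_per_layer with
      | [] => []
      | l0 :: _ =>
        ((PySem.Dict.mk l0).keys.foldl
          (fun (m2 : PySem.Dict String (List Int)) key =>
            m2.insert key (channels_per_layer.map (fun l => (pvDget l key).getD 0)))
          PySem.Dict.empty).items)
    PySem.Dict.empty (fun a _ => PySem.Dict.contains_empty a) (by simpa using hnd)
  calc merge_channel_cfgs (c0 :: rest)
      = (c0.map Prod.fst).map (fun m => ((fun m => m) m,
          (fun module_name =>
            let channels_per_layer : List (List (String × Int)) :=
              (PySem.List.pyRange 0 (c0 :: rest).length 1).map
                (fun idx => (pvDget (PySem.List.pyGetD (c0 :: rest) idx []) module_name).getD [])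
            match channels_per_layer with
            | [] => []
            | l0 :: _ =>
              ((PySem.Dict.mk l0).keys.foldl
                (fun (m2 : PySem.Dict String (List Int)) key =>
                  m2.insert key (channels_per_layer.map (fun l => (pvDget l key).getD 0)))
                PySem.Dict.empty).items) m)) := by
        show ((c0.map Prod.fst).foldl _ PySem.Dict.empty).items = _
        exact houter
    _ = pvForm (c0 :: rest) c0 := by
        apply List.map_congr_left
        intro m hm
        rcases pvDget_mem c0 hnd hm with ⟨inn, hmem, hget⟩
        simp only
        rw [pvCpl_eq (c0 :: rest) m]
        simp only [List.map_cons, hget, Option.getD_some]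
        rw [show (PySem.Dict.mk inn).keys = inn.map Prod.fst from PySem.Dict.keys_mk inn]
        have hfold := PySem.Dict.items_foldl_insert_fresh (inn.map Prod.fst) (fun k => k)
          (fun key => (pvDget inn key).getD 0 ::
            (rest.map (fun c => (pvDget c m).getD [])).map (fun l => (pvDget l key).getD 0))
          PySem.Dict.empty (fun a _ => PySem.Dict.contains_empty a) (by simpa using hnd2 _ hmem)
        refine congrArg (Prod.mk m) (hfold.trans ?_)
        simp only [show (PySem.Dict.empty : PySem.Dict String (List Int)).items = [] from rfl,
          List.nil_append]
        apply List.map_congr_left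
        intro k _
        simp [pvCell, hget, List.map_map, Function.comp_def]
    
theorem pvB_eq_form (c0 : List (String × List (String × Int))) (rest : List (List (String × List (String × Int))))
    (hnd : (c0.map Prod.fst).Nodup) (hnd2 : ∀ p ∈ c0, (p.2.map Prod.fst).Nodup) :
    merge_channel_cfgs_alt (c0 :: rest) = pvForm (c0 :: rest) c0 := by
  have houter := PySem.Dict.items_foldl_insert_fresh (c0.map Prod.fst) (fun m => m)
    (fun module_name =>
      ((PySem.Dict.mk ((pvDget c0 module_name).getD [])).keys.foldl
        (fun (a2 : PySem.Dict String (List Int)) key => a2.insert key [])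
        PySem.Dict.empty).items)
    PySem.Dict.empty (fun a _ => PySem.Dict.contains_empty a) (by simpa using hnd)
  calc merge_channel_cfgs_alt (c0 :: rest)
      = (c0 :: rest).foldl
          (fun (merged : List (String × List (String × List Int))) channel_cfg =>
            merged.map (fun e => (e.1, e.2.map (fun kv =>
              (kv.1, kv.2 ++ [(pvDget ((pvDget channel_cfg e.1).getD []) kv.1).getD 0])))))
          ((c0.map Prod.fst).map (fun m => ((fun m => m) m,
            (fun module_name =>
              ((PySem.Dict.mk ((pvDget c0 module_name).getD [])).keys.foldl
                (fun (a2 : PySem.Dict String (List Int)) key => a2.insert key [])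
                PySem.Dict.empty).items) m))) := by
        exact congrArg (fun z => List.foldl
          (fun (merged : List (String × List (String × List Int))) channel_cfg =>
            merged.map (fun e => (e.1, e.2.map (fun kv =>
              (kv.1, kv.2 ++ [(pvDget ((pvDget channel_cfg e.1).getD []) kv.1).getD 0])))))
          z (c0 :: rest)) houter
    _ = ((c0.map Prod.fst).map (fun m => (m,
            ((PySem.Dict.mk ((pvDget c0 m).getD [])).keys.foldl
              (fun (a2 : PySem.Dict String (List Int)) key => a2.insert key [])
              PySem.Dict.empty).items))).map
          (fun e => (e.1, e.2.map (fun kv =>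
            (kv.1, kv.2 ++ (c0 :: rest).map (fun c => pvCell c e.1 kv.1))))) :=
        pvScatter (c0 :: rest) _
    _ = pvForm (c0 :: rest) c0 := by
        rw [List.map_map]
        apply List.map_congr_left
        intro m hm
        rcases pvDget_mem c0 hnd hm with ⟨inn, hmem, hget⟩
        simp only [Function.comp_def]
        refine congrArg (Prod.mk m) ?_
        have hskel := PySem.Dict.items_foldl_insert_fresh
          (((pvDget c0 m).getD []).map Prod.fst) (fun k => k) (fun _ => ([] : List Int))
          PySem.Dict.empty (fun a _ => PySem.Dict.contains_empty a)
          (by simp only [hget, Option.getD_some]; simpa using hnd2 _ hmem)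
        rw [show (PySem.Dict.mk ((pvDget c0 m).getD [])).keys
              = ((pvDget c0 m).getD []).map Prod.fst from PySem.Dict.keys_mk _]
        refine ((congrArg (List.map _) hskel).trans ?_)
        simp [List.map_map, Function.comp_def, PySem.Dict.empty]

-- ===== VERDICT (by name: the statement is the Claim_ definition above) =====
theorem merge_channel_cfgs_spec : Claim_equal_merge_channel_cfgs := by
  intro cfgs _ hpre
  unfold Spec_merge_channel_cfgs
  obtain ⟨hne, hnd, _⟩ := hpre
  match cfgs, hne with
  | c0 :: rest, _ =>
    rw [pvA_eq_form c0 rest ((hnd c0 (by simp)).1) ((hnd c0 (by simp)).2), pvB_eq_form c0 rest ((hnd c0 (by simp)).1) ((hnd c0 (by simp)).2)]
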